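-- pv_equiv track=rewrite | github.com/dadadance/algos | is_monotonic.py | is_monotonic_03
-- ===== SOURCE A (Python) =====
-- def is_monotonic_03(array):
--     i = 0
--     diff = 0
--     while i < len(array) - 1 and len(array) > 2:
--         if abs(array[i + 1] - array[i]) >= diff:
--             diff = abs(array[i + 1] - array[i])
--         else:
--             return False
--         i += 1
--     return True
-- ===== SOURCE B (Python) =====
-- def is_monotonic_03(array):
--     diffs = [abs(array[i + 1] - array[i]) for i in range(len(array) - 1)]
--     return diffs == sorted(diffs)
-- ===== Notes on version B (the rewrite author's own statement) =====
-- stated objective: alternative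
-- what changed: B builds the full list of absolute successor differences in one pass and decides non-decreasingness by comparing it with its sorted copy, instead of A's running-maximum while-loop with early return.
import Mathlib
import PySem

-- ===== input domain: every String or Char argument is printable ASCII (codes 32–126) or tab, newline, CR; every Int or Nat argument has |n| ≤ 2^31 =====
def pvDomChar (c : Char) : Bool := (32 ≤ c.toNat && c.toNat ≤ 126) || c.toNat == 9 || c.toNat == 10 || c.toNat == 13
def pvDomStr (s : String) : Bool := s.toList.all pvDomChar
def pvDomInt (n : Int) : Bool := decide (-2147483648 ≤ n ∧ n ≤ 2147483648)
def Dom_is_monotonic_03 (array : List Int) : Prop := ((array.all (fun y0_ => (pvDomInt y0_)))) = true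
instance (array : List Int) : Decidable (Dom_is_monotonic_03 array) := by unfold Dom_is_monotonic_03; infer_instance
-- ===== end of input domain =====

-- B replaces A's running-maximum while-loop by building the diff list once and
-- comparing it with its sorted copy (alternative decomposition, same return value).

-- ===== PORT A =====
-- while-loop of A as recursion on the index i; array[i] is in range whenever read
-- (i+1 < len array under the loop guard), so List.getD is exact Python indexing here.
def is_monotonic_03_loop (array : List Int) (i : Nat) (diff : Int) : Bool :=
  if i < array.length - 1 ∧ array.length > 2 then
    if |array.getD (i + 1) 0 - array.getD i 0| ≥ diff then
      is_monotonic_03_loop array (i + 1) |array.getD (i + 1) 0 - array.getD i 0|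
    else false
  else true
termination_by array.length - 1 - i
decreasing_by omega

def is_monotonic_03 (array : List Int) : Bool :=
  is_monotonic_03_loop array 0 0

-- ===== PORT B =====
def is_monotonic_03_alt (array : List Int) : Bool :=
  let diffs := (List.range (array.length - 1)).map
    (fun i => |array.getD (i + 1) 0 - array.getD i 0|)
  decide (diffs = PySem.List.sorted diffs (fun x => x) false)

-- ===== PRECONDITION & SPEC =====
def Spec_is_monotonic_03 (array : List Int) (out : Bool) : Prop := out = is_monotonic_03_alt array
instance (array : List Int) (out : Bool) : Decidable (Spec_is_monotonic_03 array out) := by unfold Spec_is_monotonic_03; infer_instance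

-- ===== CLAIM (what is proved, stated in full; the proofs are below) =====
def Claim_equal_is_monotonic_03 : Prop := ∀ (array : List Int), Dom_is_monotonic_03 array → Spec_is_monotonic_03 array (is_monotonic_03 array)

-- ===== LEMMAS AND PROOFS =====

-- ===== VERDICT (by name: the statement is the Claim_ definition above) =====
-- sorted(l) == l  iff  l is pairwise non-decreasing
theorem sorted_eq_iff_pairwise (l : List Int) :
    PySem.List.sorted l (fun x => x) false = l ↔ l.Pairwise (· ≤ ·) := by
  constructor
  · intro h
    have := PySem.List.sorted_pairwise (xs := l) (key := fun x => x)
    rwa [h] at this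
  · intro h
    exact PySem.List.sorted_eq_self_of_pairwise l (fun x => x) h

-- A's loop, from index i with running maximum d, is exactly the chain predicate
-- over d followed by the remaining differences (when the array is long enough to loop).
theorem loop_iff_chain (array : List Int) (h : array.length > 2) :
    ∀ (k i : Nat) (d : Int), array.length - 1 - i = k →
      (is_monotonic_03_loop array i d = true ↔
        List.IsChain (· ≤ ·) (d :: ((List.range' i (array.length - 1 - i)).map
          (fun j => |array.getD (j + 1) 0 - array.getD j 0|)))) := by
  intro k
  induction k with
  | zero =>
    intro i d hk
    rw [is_monotonic_03_loop, hk]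
    have hng : ¬ (i < array.length - 1 ∧ array.length > 2) := by omega
    simp [hng]
  | succ k ih =>
    intro i d hk
    rw [is_monotonic_03_loop]
    have hguard : i < array.length - 1 ∧ array.length > 2 := ⟨by omega, h⟩
    rw [if_pos hguard, hk]
    have hr : List.range' i (k + 1) = i :: List.range' (i + 1) k := by
      simp [List.range'_succ]
    have hk' : array.length - 1 - (i + 1) = k := by omega
    rw [hr]
    simp only [List.map_cons, List.isChain_cons_cons]
    by_cases hge : |array.getD (i + 1) 0 - array.getD i 0| ≥ d
    · rw [if_pos hge, ih (i + 1) _ hk', hk']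
      constructor
      · intro hc; exact ⟨hge, hc⟩
      · intro hc; exact hc.2
    · rw [if_neg hge]
      constructor
      · intro hc; exact absurd hc Bool.false_ne_true
      · intro hc; exact absurd hc.1 hge

theorem is_monotonic_03_spec : Claim_equal_is_monotonic_03 := by
  intro array _
  unfold Spec_is_monotonic_03 is_monotonic_03 is_monotonic_03_alt
  by_cases h : array.length > 2
  · have hloop := loop_iff_chain array h (array.length - 1 - 0) 0 0 rfl
    simp only [Nat.sub_zero] at hloop
    have hrange : List.range' 0 (array.length - 1) = List.range (array.length - 1) := by
      simp [List.range_eq_range']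
    rw [hrange] at hloop
    set diffs := (List.range (array.length - 1)).map
      (fun j => |array.getD (j + 1) 0 - array.getD j 0|) with hdiffs
    have hchain : List.IsChain (· ≤ ·) ((0 : Int) :: diffs) ↔ diffs.Pairwise (· ≤ ·) := by
      constructor
      · intro hc
        cases hd : diffs with
        | nil => simp
        | cons x t =>
          rw [hd] at hc
          exact List.isChain_iff_pairwise.mp (List.isChain_cons_cons.mp hc).2
      · intro hp
        cases hd : diffs with
        | nil => simp
        | cons x t =>
          refine List.isChain_cons_cons.mpr ⟨?_, ?_⟩
          · have hx : x ∈ diffs := by rw [hd]; exact List.mem_cons_self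
            obtain ⟨j, _, hj⟩ := List.mem_map.mp hx
            rw [← hj]; exact abs_nonneg _
          · rw [← hd]; exact List.isChain_iff_pairwise.mpr hp
    by_cases hA : is_monotonic_03_loop array 0 0 = true
    · rw [hA]
      symm
      rw [decide_eq_true_eq]
      exact ((sorted_eq_iff_pairwise diffs).mpr (hchain.mp (hloop.mp hA))).symm
    · rw [Bool.not_eq_true] at hA
      rw [hA]
      symm
      rw [decide_eq_false_iff_not]
      intro hs
      have : is_monotonic_03_loop array 0 0 = true :=
        hloop.mpr (hchain.mpr ((sorted_eq_iff_pairwise diffs).mp hs.symm))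
      rw [hA] at this; exact Bool.false_ne_true this
  · -- short arrays: A returns True immediately; diffs has ≤ 1 element, sorted fixes it
    rw [is_monotonic_03_loop]
    have hng : ¬ (0 < array.length - 1 ∧ array.length > 2) := by omega
    rw [if_neg hng]
    symm
    rw [decide_eq_true_eq]
    symm
    apply PySem.List.sorted_eq_self_of_pairwise
    have h1 : array.length - 1 = 0 ∨ array.length - 1 = 1 := by omega
    rcases h1 with h1 | h1 <;> rw [h1] <;> simp
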